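-- pv_equiv track=rewrite | github.com/acmeism/RosettaCodeData | Task/Permutations-by-swapping/Python/permutations-by-swapping-2.py | s_permutations
-- ===== SOURCE A (Python) =====
-- def s_permutations(seq):
--     def s_perm(seq):
--         if not seq:
--             return [[]]
--         else:
--             new_items = []
--             for i, item in enumerate(s_perm(seq[:-1])):
--                 if i % 2:
--                     # step up
--                     new_items += [item[:i] + seq[-1:] + item[i:]
--                                   for i in range(len(item) + 1)]
--                 else:
--                     # step down
--                     new_items += [item[:i] + seq[-1:] + item[i:]
--                                   for i in range(len(item), -1, -1)]
--             return new_items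
--
--     return [(tuple(item), -1 if i % 2 else 1)
--             for i, item in enumerate(s_perm(seq))]
-- ===== SOURCE B (Python) =====
-- def s_permutations(seq):
--     perms = [[]]
--     for elem in seq:
--         new_perms = []
--         for i, item in enumerate(perms):
--             rows = [item[:p] + [elem] + item[p:] for p in range(len(item) + 1)]
--             if i % 2 == 0:
--                 rows.reverse()
--             new_perms.extend(rows)
--         perms = new_perms
--     out = []
--     sign = 1
--     for item in perms:
--         out.append((tuple(item), sign))
--         sign = -sign
--     return out
-- ===== Notes on version B (the rewrite author's own statement) =====
-- stated objective: alternative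
-- what changed: Replaces A's recursion on seq[:-1] by a bottom-up loop folding each element into an accumulator of permutations (building ascending insertions and reversing them for even rows), and replaces the final enumerate-based sign comprehension by a running alternating-sign accumulator.
import Mathlib
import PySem

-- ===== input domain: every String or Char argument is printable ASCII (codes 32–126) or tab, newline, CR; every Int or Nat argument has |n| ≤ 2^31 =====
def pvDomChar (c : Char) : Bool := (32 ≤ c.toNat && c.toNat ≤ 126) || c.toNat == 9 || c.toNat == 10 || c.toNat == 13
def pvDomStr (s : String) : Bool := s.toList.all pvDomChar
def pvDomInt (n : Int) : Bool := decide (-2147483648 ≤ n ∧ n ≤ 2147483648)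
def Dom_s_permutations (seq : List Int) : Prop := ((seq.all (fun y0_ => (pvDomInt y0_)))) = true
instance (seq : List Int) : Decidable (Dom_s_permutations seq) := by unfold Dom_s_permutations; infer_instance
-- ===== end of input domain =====

-- B replaces A's recursion by a bottom-up foldl over the elements (same SJT order); objective: alternative decomposition, same cost.

-- ===== PORT A =====
-- inner recursive helper s_perm of A (recursion on seq[:-1])
def pvSPerm (seq : List Int) : List (List Int) :=
  if h : seq = [] then [[]]
  else
    (PySem.List.enumerate (pvSPerm seq.dropLast) 0).foldl
      (fun new_items p =>
        if p.1 % 2 ≠ 0 then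
          -- step up
          new_items ++ (PySem.List.pyRange 0 ((p.2.length : Int) + 1) 1).map (fun i =>
            PySem.List.slice p.2 none (some i) ++ PySem.List.slice seq (some (-1)) none
              ++ PySem.List.slice p.2 (some i) none)
        else
          -- step down
          new_items ++ (PySem.List.pyRange ((p.2.length : Int)) (-1) (-1)).map (fun i =>
            PySem.List.slice p.2 none (some i) ++ PySem.List.slice seq (some (-1)) none
              ++ PySem.List.slice p.2 (some i) none))
      []
termination_by seq.length
decreasing_by
  have : seq.length ≠ 0 := fun hn => h (List.eq_nil_of_length_eq_zero hn)
  simp [List.length_dropLast]; omega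

def s_permutations (seq : List Int) : List (List Int × Int) :=
  (PySem.List.enumerate (pvSPerm seq) 0).map
    (fun p => (p.2, if p.1 % 2 ≠ 0 then (-1 : Int) else 1))

-- ===== PORT B =====
def s_permutations_alt (seq : List Int) : List (List Int × Int) :=
  let perms := seq.foldl (fun perms elem =>
    (PySem.List.enumerate perms 0).foldl (fun new_perms p =>
      let rows := (PySem.List.pyRange 0 ((p.2.length : Int) + 1) 1).map (fun q =>
        PySem.List.slice p.2 none (some q) ++ [elem] ++ PySem.List.slice p.2 (some q) none)
      new_perms ++ (if p.1 % 2 == 0 then rows.reverse else rows)) []) [[]]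
  (perms.foldl (fun (st : List (List Int × Int) × Int) item =>
      (st.1 ++ [(item, st.2)], -st.2)) ([], 1)).1

-- ===== PRECONDITION & SPEC =====
def Spec_s_permutations (seq : List Int) (out : List (List Int × Int)) : Prop := out = s_permutations_alt seq
instance (seq : List Int) (out : List (List Int × Int)) : Decidable (Spec_s_permutations seq out) := by unfold Spec_s_permutations; infer_instance

-- ===== CLAIM (what is proved, stated in full; the proofs are below) =====
def Claim_equal_s_permutations : Prop := ∀ (seq : List Int), Dom_s_permutations seq → Spec_s_permutations seq (s_permutations seq)

-- ===== LEMMAS AND PROOFS =====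

-- B's inner step, abstracted for the proof
def pvStepB (perms : List (List Int)) (elem : Int) : List (List Int) :=
  (PySem.List.enumerate perms 0).foldl (fun new_perms p =>
    let rows := (PySem.List.pyRange 0 ((p.2.length : Int) + 1) 1).map (fun q =>
      PySem.List.slice p.2 none (some q) ++ [elem] ++ PySem.List.slice p.2 (some q) none)
    new_perms ++ (if p.1 % 2 == 0 then rows.reverse else rows)) []

-- spec of B's sign loop
def pvSigned : List (List Int) → Int → List (List Int × Int)
  | [], _ => []
  | x :: l, s => (x, s) :: pvSigned l (-s)

lemma pvStepB_eq (seq : List Int) (hne : seq ≠ [])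
    (l : List (List Int)) :
    (PySem.List.enumerate l 0).foldl
      (fun new_items p =>
        if p.1 % 2 ≠ 0 then
          new_items ++ (PySem.List.pyRange 0 ((p.2.length : Int) + 1) 1).map (fun i =>
            PySem.List.slice p.2 none (some i) ++ PySem.List.slice seq (some (-1)) none
              ++ PySem.List.slice p.2 (some i) none)
        else
          new_items ++ (PySem.List.pyRange ((p.2.length : Int)) (-1) (-1)).map (fun i =>
            PySem.List.slice p.2 none (some i) ++ PySem.List.slice seq (some (-1)) none
              ++ PySem.List.slice p.2 (some i) none))
      []
    = pvStepB l (seq.getLast hne) := by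
  have hslice : PySem.List.slice seq (some (-1)) none = [seq.getLast hne] := by
    rw [PySem.List.slice_from_neg_one]
    rw [List.drop_length_sub_one hne]
  unfold pvStepB
  congr 1
  funext acc p
  by_cases hp : p.1 % 2 = 0
  · simp only [hp, hslice]
    simp [PySem.List.pyRange_neg_one_eq_reverse, List.map_reverse]
  · simp [hp, hslice]

lemma pvSPerm_eq_foldl (seq : List Int) :
    pvSPerm seq = seq.foldl pvStepB [[]] := by
  induction seq using List.reverseRecOn with
  | nil => simp [pvSPerm]
  | append_singleton xs x ih =>
    have hne : xs ++ [x] ≠ [] := by simp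
    rw [pvSPerm]
    simp only [hne, dite_false]
    rw [List.dropLast_concat, ih, pvStepB_eq (xs ++ [x]) hne, List.getLast_append_singleton,
      List.foldl_append]
    simp

lemma pvSigned_foldl (l : List (List Int)) (acc : List (List Int × Int)) (s : Int) :
    (l.foldl (fun (st : List (List Int × Int) × Int) item =>
        (st.1 ++ [(item, st.2)], -st.2)) (acc, s)).1 = acc ++ pvSigned l s := by
  induction l generalizing acc s with
  | nil => simp [pvSigned]
  | cons x l ih => simp [pvSigned, ih]

lemma pvSigned_enumerate (l : List (List Int)) (k : Int) (hk : 0 ≤ k) :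
    (PySem.List.enumerate l k).map (fun p => (p.2, if p.1 % 2 ≠ 0 then (-1 : Int) else 1))
      = pvSigned l (if k % 2 ≠ 0 then -1 else 1) := by
  induction l generalizing k with
  | nil => simp [PySem.List.enumerate_nil, pvSigned]
  | cons x l ih =>
    rw [PySem.List.enumerate_cons, List.map_cons, ih (k + 1) (by omega)]
    by_cases h : k % 2 = 0
    · have h1 : (k + 1) % 2 ≠ 0 := by omega
      simp [pvSigned, h, h1]
    · have h1 : (k + 1) % 2 = 0 := by omega
      simp [pvSigned, h, h1]

-- ===== VERDICT (by name: the statement is the Claim_ definition above) =====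
theorem s_permutations_spec : Claim_equal_s_permutations := by
  intro seq _
  show s_permutations seq = s_permutations_alt seq
  unfold s_permutations s_permutations_alt
  rw [pvSPerm_eq_foldl, pvSigned_enumerate _ 0 (by omega),
    (by norm_num : (if (0 : Int) % 2 ≠ 0 then (-1 : Int) else 1) = 1),
    pvSigned_foldl, List.nil_append]
  rfl
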